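-- pv_equiv track=rewrite | github.com/andcavan/PDM-SW-2 | ui/bulk_coding_import_dialog.py | generate_series
-- ===== SOURCE A (Python) =====
-- def _alpha_to_int(code: str) -> int:
--     n = 0
--     for c in code.upper():
--         n = n * 26 + (ord(c) - ord('A'))
--     return n
--
-- def _int_to_alpha(n: int, length: int) -> str:
--     chars = []
--     for _ in range(length):
--         chars.append(chr(n % 26 + ord('A')))
--         n //= 26
--     return ''.join(reversed(chars))
--
-- def generate_series(first: str, last: str, code_type: str) -> list[str]:
--     """Genera tutti i codici tra first e last inclusi (ALPHA o NUM)."""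
--     first, last = first.upper(), last.upper()
--     length = len(first)
--     if len(last) != length:
--         return []
--     if code_type == "ALPHA":
--         s = _alpha_to_int(first)
--         e = _alpha_to_int(last)
--         if s > e:
--             s, e = e, s
--         return [_int_to_alpha(i, length) for i in range(s, e + 1)]
--     else:  # NUM
--         try:
--             s, e = int(first), int(last)
--         except ValueError:
--             return []
--         if s > e:
--             s, e = e, s
--         return [str(i).zfill(length) for i in range(s, e + 1)]
-- ===== SOURCE B (Python) =====
-- def _inc(rev):
--     """Increment a reversed A-Z digit list by one, with carry (Z...Z wraps to A...A)."""
--     if not rev: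
--         return []
--     if rev[0] == 'Z':
--         return ['A'] + _inc(rev[1:])
--     return [chr(ord(rev[0]) + 1)] + rev[1:]
--
--
-- def generate_series(first: str, last: str, code_type: str) -> list[str]:
--     """Genera tutti i codici tra first e last inclusi (ALPHA o NUM)."""
--     first, last = first.upper(), last.upper()
--     length = len(first)
--     if len(last) != length:
--         return []
--     if code_type == "ALPHA":
--         s = 0
--         for c in first:
--             s = s * 26 + (ord(c) - ord('A'))
--         e = 0
--         for c in last:
--             e = e * 26 + (ord(c) - ord('A'))
--         if s > e:
--             s, e = e, s
--         # canonical start code as a reversed digit list, then odometer-increment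
--         rev = []
--         n = s
--         for _ in range(length):
--             rev.append(chr(n % 26 + ord('A')))
--             n //= 26
--         out = []
--         for _ in range(e - s + 1):
--             out.append(''.join(reversed(rev)))
--             rev = _inc(rev)
--         return out
--     else:  # NUM
--         try:
--             s, e = int(first), int(last)
--         except ValueError:
--             return []
--         if s > e:
--             s, e = e, s
--         out = []
--         i = e
--         while i >= s:
--             out.append(str(i).zfill(length))
--             i -= 1
--         out.reverse()
--         return out
-- ===== Notes on version B (the rewrite author's own statement) =====
-- stated objective: alternative
-- what changed: The ALPHA branch no longer converts every index in range(s, e+1) back to a code via repeated divmod-by-26; it builds the start code's digit list once and enumerates by an increment-with-carry string odometer, and the NUM branch builds the list by a descending accumulator loop that is reversed at the end.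
import Mathlib
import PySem

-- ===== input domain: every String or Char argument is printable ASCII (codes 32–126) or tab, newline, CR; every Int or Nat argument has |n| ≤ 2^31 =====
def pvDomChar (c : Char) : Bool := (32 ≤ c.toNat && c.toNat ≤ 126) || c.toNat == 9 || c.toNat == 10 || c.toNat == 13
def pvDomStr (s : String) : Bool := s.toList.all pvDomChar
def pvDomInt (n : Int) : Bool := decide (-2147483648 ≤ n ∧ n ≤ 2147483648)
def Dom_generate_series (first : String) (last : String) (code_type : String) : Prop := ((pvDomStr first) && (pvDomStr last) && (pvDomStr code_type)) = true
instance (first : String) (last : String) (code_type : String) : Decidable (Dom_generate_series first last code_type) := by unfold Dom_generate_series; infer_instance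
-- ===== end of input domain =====

-- B replaces A's per-element base-26 round trip with a single string odometer (increment-with-carry)
-- for the ALPHA branch and a descending accumulator loop for the NUM branch: an alternative algorithm
-- of similar cost (proved to return exactly A's value on all inputs).


-- ===== PORT A =====
-- _alpha_to_int: n = n*26 + (ord(c) - ord('A')) over code.upper()
def pvAlphaToInt (code : String) : Int :=
  (PySem.Chars.upper code.toList).foldl (fun n c => n * 26 + ((c.toNat : Int) - 65)) 0

-- _int_to_alpha: chars.append(chr(n % 26 + ord('A'))); n //= 26, then ''.join(reversed(chars))
def pvIntToAlpha (n : Int) (length : Int) : String :=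
  String.ofList ((PySem.List.pyRange 0 length 1).foldl
    (fun (p : List Char × Int) _ =>
      (p.1 ++ [Char.ofNat ((PySem.Int.mod p.2 26).toNat + 65)], PySem.Int.floordiv p.2 26))
    ([], n)).1.reverse

def generate_series (first : String) (last : String) (code_type : String) : List String :=
  let f := PySem.Str.upper first
  let l := PySem.Str.upper last
  let length := PySem.Str.len f
  if PySem.Str.len l ≠ length then []
  else if code_type = "ALPHA" then
    let s := pvAlphaToInt f
    let e := pvAlphaToInt l
    let p := if s > e then (e, s) else (s, e)
    (PySem.List.pyRange p.1 (p.2 + 1) 1).map (fun i => pvIntToAlpha i length)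
  else
    match PySem.Int.ofStr? f, PySem.Int.ofStr? l with
    | some s0, some e0 =>
      let p := if s0 > e0 then (e0, s0) else (s0, e0)
      (PySem.List.pyRange p.1 (p.2 + 1) 1).map (fun i => PySem.Str.zfill (PySem.Int.toStr i) length)
    | _, _ => []

-- ===== PORT B =====
-- _inc: increment a reversed A-Z digit list with carry
def pvInc : List Char → List Char
  | [] => []
  | c :: rest => if c = 'Z' then 'A' :: pvInc rest else Char.ofNat (c.toNat + 1) :: rest

-- for _ in range(k): out.append(''.join(reversed(rev))); rev = _inc(rev)
def pvEmit : Nat → List Char → List String → List String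
  | 0, _, out => out
  | k + 1, rev, out => pvEmit k (pvInc rev) (out ++ [String.ofList rev.reverse])

-- while i >= s: out.append(str(i).zfill(length)); i -= 1
def pvNumLoop (s : Int) (length : Int) (i : Int) (out : List String) : List String :=
  if _h : i ≥ s then
    pvNumLoop s length (i - 1) (out ++ [PySem.Str.zfill (PySem.Int.toStr i) length])
  else out
termination_by (i + 1 - s).toNat
decreasing_by omega

def generate_series_alt (first : String) (last : String) (code_type : String) : List String :=
  let f := PySem.Str.upper first
  let l := PySem.Str.upper last
  let length := PySem.Str.len f
  if PySem.Str.len l ≠ length then []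
  else if code_type = "ALPHA" then
    let s0 := f.toList.foldl (fun n c => n * 26 + ((c.toNat : Int) - 65)) 0
    let e0 := l.toList.foldl (fun n c => n * 26 + ((c.toNat : Int) - 65)) 0
    let p := if s0 > e0 then (e0, s0) else (s0, e0)
    let rev := ((PySem.List.pyRange 0 length 1).foldl
      (fun (q : List Char × Int) _ =>
        (q.1 ++ [Char.ofNat ((PySem.Int.mod q.2 26).toNat + 65)], PySem.Int.floordiv q.2 26))
      ([], p.1)).1
    pvEmit (p.2 - p.1 + 1).toNat rev []
  else
    match PySem.Int.ofStr? f with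
    | none => []
    | some s0 =>
      match PySem.Int.ofStr? l with
      | none => []
      | some e0 =>
        let p := if s0 > e0 then (e0, s0) else (s0, e0)
        (pvNumLoop p.1 length p.2 []).reverse

-- ===== PRECONDITION & SPEC =====
def Spec_generate_series (first : String) (last : String) (code_type : String) (out : List String) : Prop := out = generate_series_alt first last code_type
instance (first : String) (last : String) (code_type : String) (out : List String) : Decidable (Spec_generate_series first last code_type out) := by unfold Spec_generate_series; infer_instance

-- ===== CLAIM (what is proved, stated in full; the proofs are below) =====
def Claim_equal_generate_series : Prop := ∀ (first : String) (last : String) (code_type : String), Dom_generate_series first last code_type → Spec_generate_series first last code_type (generate_series first last code_type)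

-- ===== LEMMAS AND PROOFS =====

theorem pvCharLeIff (c d : Char) : (c ≤ d) ↔ c.toNat ≤ d.toNat := Iff.rfl

theorem pvIslowerIff (c : Char) : PySem.Chars.islower c = true ↔ 97 ≤ c.toNat ∧ c.toNat ≤ 122 := by
  simp only [PySem.Chars.islower, Bool.and_eq_true, decide_eq_true_eq, pvCharLeIff]
  have h1 : ('a').toNat = 97 := rfl
  have h2 : ('z').toNat = 122 := rfl
  omega

theorem pvUpperCharIdem (c : Char) :
    PySem.Chars.upperChar (PySem.Chars.upperChar c) = PySem.Chars.upperChar c := by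
  by_cases h : PySem.Chars.islower c = true
  · have hb : 97 ≤ c.toNat ∧ c.toNat ≤ 122 := (pvIslowerIff c).mp h
    have hv : (c.toNat - 32).isValidChar := Or.inl (by omega)
    have ht : (Char.ofNat (c.toNat - 32)).toNat = c.toNat - 32 := by
      rw [Char.toNat_ofNat]; simp [hv]
    have h2 : PySem.Chars.islower (Char.ofNat (c.toNat - 32)) = false := by
      rw [Bool.eq_false_iff]; intro hc
      have := (pvIslowerIff _).mp hc; omega
    simp [PySem.Chars.upperChar, h, h2]
  · simp [PySem.Chars.upperChar, h]

theorem pvUpperIdem (l : List Char) :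
    PySem.Chars.upper (PySem.Chars.upper l) = PySem.Chars.upper l := by
  simp [PySem.Chars.upper, List.map_map, Function.comp_def, pvUpperCharIdem]

-- the reversed digit list after k iterations of the chars/rev building loop
def pvDigitsR : Nat → Int → List Char
  | 0, _ => []
  | k + 1, n =>
    Char.ofNat ((PySem.Int.mod n 26).toNat + 65) :: pvDigitsR k (PySem.Int.floordiv n 26)

theorem pvFoldDigits {α : Type} (l : List α) (acc : List Char) (n : Int) :
    (l.foldl
      (fun (q : List Char × Int) _ =>
        (q.1 ++ [Char.ofNat ((PySem.Int.mod q.2 26).toNat + 65)], PySem.Int.floordiv q.2 26))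
      (acc, n)).1 = acc ++ pvDigitsR l.length n := by
  induction l generalizing acc n with
  | nil => simp [pvDigitsR]
  | cons x xs ih =>
    rw [List.foldl_cons, ih]
    simp only [List.length_cons, pvDigitsR]
    simp

theorem pvIncDigits (L : Nat) (n : Int) : pvInc (pvDigitsR L n) = pvDigitsR L (n + 1) := by
  induction L generalizing n with
  | zero => simp [pvDigitsR, pvInc]
  | succ k ih =>
    have hm := PySem.Int.mod_eq_emod_of_pos (a := n) (b := 26) (by omega)
    have hm1 := PySem.Int.mod_eq_emod_of_pos (a := n + 1) (b := 26) (by omega)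
    have hd := PySem.Int.floordiv_eq_ediv_of_pos (a := n) (b := 26) (by omega)
    have hd1 := PySem.Int.floordiv_eq_ediv_of_pos (a := n + 1) (b := 26) (by omega)
    have hrange : 0 ≤ n % 26 ∧ n % 26 < 26 := by omega
    simp only [pvDigitsR, pvInc, hm, hm1, hd, hd1]
    by_cases h25 : n % 26 = 25
    · have hz : Char.ofNat ((n % 26).toNat + 65) = 'Z' := by rw [h25]; rfl
      have hm2 : (n + 1) % 26 = 0 := by omega
      have hd2 : (n + 1) / 26 = n / 26 + 1 := by omega
      rw [if_pos hz, hm2, hd2, ← ih]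
      simp
    · have hv : ((n % 26).toNat + 65).isValidChar := Or.inl (by omega)
      have ht : (Char.ofNat ((n % 26).toNat + 65)).toNat = (n % 26).toNat + 65 := by
        rw [Char.toNat_ofNat]; simp [hv]
      have hnz : Char.ofNat ((n % 26).toNat + 65) ≠ 'Z' := by
        intro hc
        have h90 : ('Z').toNat = 90 := rfl
        rw [hc, h90] at ht; omega
      have hm2 : (n + 1) % 26 = n % 26 + 1 := by omega
      have hd2 : (n + 1) / 26 = n / 26 := by omega
      rw [if_neg hnz, hm2, hd2, ht]
      congr 2
      omega

theorem pvEmitEq (k : Nat) (L : Nat) (n : Int) (out : List String) :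
    pvEmit k (pvDigitsR L n) out =
      out ++ (PySem.List.pyRange n (n + k) 1).map (fun i => String.ofList (pvDigitsR L i).reverse) := by
  induction k generalizing n out with
  | zero => simp [pvEmit]
  | succ k ih =>
    have hlt : n < n + ((k : Nat) + 1 : Nat) := by push_cast; omega
    rw [PySem.List.pyRange_one_cons hlt]
    simp only [pvEmit, pvIncDigits, ih]
    have : n + ((k : Nat) + 1 : Nat) = (n + 1) + (k : Nat) := by push_cast; ring
    rw [this]
    simp

theorem pvNumLoopEq (s length : Int) (i : Int) (out : List String) :
    pvNumLoop s length i out =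
      out ++ ((PySem.List.pyRange s (i + 1) 1).map
        (fun j => PySem.Str.zfill (PySem.Int.toStr j) length)).reverse := by
  by_cases h : i ≥ s
  · rw [pvNumLoop]
    rw [dif_pos h]
    rw [pvNumLoopEq s length (i - 1) (out ++ [PySem.Str.zfill (PySem.Int.toStr i) length])]
    rw [show i - 1 + 1 = i by ring, PySem.List.pyRange_one_succ_right h]
    simp
  · rw [pvNumLoop, dif_neg h, PySem.List.pyRange_one_eq_nil (by omega : i + 1 ≤ s)]
    simp
termination_by (i + 1 - s).toNat
decreasing_by omega

-- ===== VERDICT (by name: the statement is the Claim_ definition above) =====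
set_option maxHeartbeats 1000000 in
theorem generate_series_spec : Claim_equal_generate_series := by
  intro first last code_type _
  unfold Spec_generate_series generate_series generate_series_alt
  simp only []
  have hup : ∀ x : String,
      (PySem.Str.upper x).toList.foldl (fun n c => n * 26 + ((c.toNat : Int) - 65)) 0 =
        pvAlphaToInt (PySem.Str.upper x) := by
    intro x
    unfold pvAlphaToInt
    rw [PySem.Str.toList_upper, pvUpperIdem]
  rw [hup first, hup last]
  by_cases h1 : PySem.Str.len (PySem.Str.upper last) ≠ PySem.Str.len (PySem.Str.upper first)
  · rw [if_pos h1, if_pos h1]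
  · rw [if_neg h1, if_neg h1]
    by_cases h2 : code_type = "ALPHA"
    · rw [if_pos h2, if_pos h2]
      have main : ∀ a b : Int, a ≤ b →
          (PySem.List.pyRange a (b + 1) 1).map
              (fun i => pvIntToAlpha i (PySem.Str.len (PySem.Str.upper first))) =
            pvEmit (b - a + 1).toNat
              (((PySem.List.pyRange 0 (PySem.Str.len (PySem.Str.upper first)) 1).foldl
                (fun (q : List Char × Int) _ =>
                  (q.1 ++ [Char.ofNat ((PySem.Int.mod q.2 26).toNat + 65)], PySem.Int.floordiv q.2 26))
                ([], a)).1) [] := by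
        intro a b hab
        rw [pvFoldDigits, List.nil_append, pvEmitEq]
        have hk : a + ((b - a + 1).toNat : Int) = b + 1 := by omega
        rw [hk]
        simp only [List.nil_append]
        apply List.map_congr_left
        intro i _
        unfold pvIntToAlpha
        rw [pvFoldDigits]
        simp
      by_cases h3 : pvAlphaToInt (PySem.Str.upper first) > pvAlphaToInt (PySem.Str.upper last)
      · rw [if_pos h3]
        have hle : pvAlphaToInt (PySem.Str.upper last) ≤ pvAlphaToInt (PySem.Str.upper first) :=
          le_of_lt h3
        exact main _ _ hle
      · rw [if_neg h3]
        have hle : pvAlphaToInt (PySem.Str.upper first) ≤ pvAlphaToInt (PySem.Str.upper last) :=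
          le_of_not_gt h3
        exact main _ _ hle
    · rw [if_neg h2, if_neg h2]
      cases hf : PySem.Int.ofStr? (PySem.Str.upper first) with
      | none => rfl
      | some s0 =>
        cases hl : PySem.Int.ofStr? (PySem.Str.upper last) with
        | none => rfl
        | some e0 =>
          simp only []
          by_cases h3 : s0 > e0
          · rw [if_pos h3, pvNumLoopEq]
            simp
          · rw [if_neg h3, pvNumLoopEq]
            simp
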